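-- pv_equiv track=rewrite | github.com/FreddieSamy/AlexQkit | server/booleanExpression.py | optmizationCancelation
-- ===== SOURCE A (Python) =====
-- def optmizationCancelation(collectedProduct): # Cancel every two similar  terms
--     n = len(collectedProduct) # Take the length after made product on normal form equations .
--     index = 1
--     prevStart = 0
--     while n > index :
--         while index < n :
--             if collectedProduct[prevStart] == collectedProduct[index]:
--                 collectedProduct.pop(index)
--                 collectedProduct.pop(prevStart)
--                 index = prevStart + 1
--                 n-=2
--                 break
--             else :
--                 index+=1
--
--         if prevStart + 1 != index :
--             prevStart += 1
--             index = prevStart + 1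
--     return collectedProduct
-- ===== SOURCE B (Python) =====
-- def optmizationCancelation(collectedProduct):  # Cancel every two similar terms
--     seen = {}
--     for t in collectedProduct:
--         if t in seen:
--             del seen[t]
--         else:
--             seen[t] = None
--     collectedProduct[:] = seen  # mutate in place, like the original
--     return collectedProduct
-- ===== Notes on version B (the rewrite author's own statement) =====
-- stated objective: faster
-- what changed: Replaced the nested scan-and-pop loops (rescan from prevStart+1 after every cancellation) by a single forward pass over the list toggling each term in an insertion-ordered dict, so each pair cancels in O(1) and the surviving odd-count terms come out in the same order.
import Mathlib
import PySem

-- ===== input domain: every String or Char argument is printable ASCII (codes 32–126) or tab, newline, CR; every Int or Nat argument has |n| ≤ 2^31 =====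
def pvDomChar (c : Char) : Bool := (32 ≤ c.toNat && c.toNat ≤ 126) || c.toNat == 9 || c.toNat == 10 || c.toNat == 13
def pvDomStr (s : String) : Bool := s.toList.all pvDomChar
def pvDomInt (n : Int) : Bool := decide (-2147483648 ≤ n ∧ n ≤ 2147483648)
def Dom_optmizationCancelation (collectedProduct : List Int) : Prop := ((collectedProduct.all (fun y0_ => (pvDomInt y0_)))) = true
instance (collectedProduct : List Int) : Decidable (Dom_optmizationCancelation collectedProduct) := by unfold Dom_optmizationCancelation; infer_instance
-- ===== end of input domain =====

-- B replaces A's quadratic nested scan-and-pop pair cancellation by a single forward pass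
-- toggling each term in an insertion-ordered dict (reported faster only if a timing run
-- confirms it); both Pythons mutate the argument list in place the same way, and the
-- equivalence proved here is about the return value.


-- ===== PORT A =====
-- Inner `while index < n` loop of A: scan for a term equal to collectedProduct[prevStart];
-- on a match pop index then prevStart (ps < index, so erasing index first leaves position ps
-- untouched), set index = prevStart+1, n -= 2 and break; otherwise index += 1.
-- n, prevStart, index are nonnegative throughout in Python, so they are carried as Nat;
-- all indexing in A stays in range (n = length), so the `(l, n, idx)` fallback of the
-- `none` match arms is unreachable.
def pvInnerA (l : List Int) (n ps idx : Nat) : List Int × Nat × Nat :=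
  if _h : idx < n then
    match l[ps]?, l[idx]? with
    | some a, some b =>
      if a = b then ((l.eraseIdx idx).eraseIdx ps, n - 2, ps + 1)
      else pvInnerA l n ps (idx + 1)
    | _, _ => (l, n, idx)
  else (l, n, idx)
termination_by n - idx

-- Outer `while n > index` loop of A; one unit of fuel per iteration (the fuel supplied
-- below always suffices: each iteration removes two elements or advances prevStart).
def pvOuterA (fuel : Nat) (l : List Int) (n ps idx : Nat) : List Int :=
  match fuel with
  | 0 => l  -- fuel exhausted: unreachable with the fuel supplied below
  | fuel + 1 =>
    if n > idx then
      match pvInnerA l n ps idx with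
      | (l', n', idx') =>
        if ps + 1 ≠ idx' then pvOuterA fuel l' n' (ps + 1) (ps + 2)
        else pvOuterA fuel l' n' ps idx'
    else l

def optmizationCancelation (collectedProduct : List Int) : List Int :=
  pvOuterA (2 * collectedProduct.length + 1) collectedProduct collectedProduct.length 0 1

-- ===== PORT B =====
-- `seen` is the Python dict; `t in seen` → contains, `del seen[t]` → erase,
-- `seen[t] = None` → insert with the trivial value; `collectedProduct[:] = seen`
-- followed by `return collectedProduct` returns the keys in insertion order.
def optmizationCancelation_alt (collectedProduct : List Int) : List Int :=
  (collectedProduct.foldl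
    (fun seen t => if seen.contains t then seen.erase t else seen.insert t ())
    (PySem.Dict.empty : PySem.Dict Int Unit)).keys

-- ===== PRECONDITION & SPEC =====
def Spec_optmizationCancelation (collectedProduct : List Int) (out : List Int) : Prop := out = optmizationCancelation_alt collectedProduct
instance (collectedProduct : List Int) (out : List Int) : Decidable (Spec_optmizationCancelation collectedProduct out) := by unfold Spec_optmizationCancelation; infer_instance

-- ===== CLAIM (what is proved, stated in full; the proofs are below) =====
def Claim_equal_optmizationCancelation : Prop := ∀ (collectedProduct : List Int), Dom_optmizationCancelation collectedProduct → Spec_optmizationCancelation collectedProduct (optmizationCancelation collectedProduct)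

-- ===== LEMMAS AND PROOFS =====

-- The list-level toggle that the dict fold of B performs on its key list.
def pvTg (acc : List Int) (t : Int) : List Int :=
  if t ∈ acc then acc.erase t else acc ++ [t]

def pvTgf (l : List Int) : List Int := l.foldl pvTg []

-- B's dict fold, viewed on keys, is the toggle fold.
lemma pvKeysFold (l : List Int) (d : PySem.Dict Int Unit) (hnd : d.keys.Nodup) :
    ((l.foldl (fun seen t => if seen.contains t then seen.erase t else seen.insert t ())
        d).keys = l.foldl pvTg d.keys) ∧
    ((l.foldl (fun seen t => if seen.contains t then seen.erase t else seen.insert t ())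
        d).keys).Nodup := by
  induction l generalizing d with
  | nil => exact ⟨rfl, hnd⟩
  | cons t l ih =>
    simp only [List.foldl_cons]
    by_cases hc : d.contains t = true
    · rw [if_pos hc]
      have hmem : t ∈ d.keys := (PySem.Dict.contains_iff_mem_keys d t).mp hc
      have hkeys : (d.erase t).keys = d.keys.erase t := by
        show (d.items.filter (fun p => !(p.1 == t))).map (fun x => x.1) = d.keys.erase t
        rw [hnd.erase_eq_filter, PySem.Dict.keys, List.filter_map]
        congr 1
      have hnd' : (d.erase t).keys.Nodup := by rw [hkeys]; exact hnd.erase t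
      obtain ⟨h1, h2⟩ := ih (d.erase t) hnd'
      refine ⟨?_, h2⟩
      rw [h1, hkeys]
      simp only [pvTg]
      rw [if_pos hmem]
    · rw [if_neg hc]
      have hcf : d.contains t = false := by simpa using hc
      have hmem : t ∉ d.keys := fun h => hc ((PySem.Dict.contains_iff_mem_keys d t).mpr h)
      have hkeys : (d.insert t ()).keys = d.keys ++ [t] := by
        show ((d.insert t ()).items.map (fun x => x.1)) = d.keys ++ [t]
        rw [PySem.Dict.items_insert_of_not_contains d () hcf]
        simp [PySem.Dict.keys]
      have hnd' : (d.insert t ()).keys.Nodup := by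
        rw [hkeys]
        simp [List.nodup_append, hnd]
        exact fun a ha h => hmem (h ▸ ha)
      obtain ⟨h1, h2⟩ := ih (d.insert t ()) hnd'
      refine ⟨?_, h2⟩
      rw [h1, hkeys]
      simp only [pvTg]
      rw [if_neg hmem]

lemma pvAltEqTgf (l : List Int) : optmizationCancelation_alt l = pvTgf l := by
  have h := (pvKeysFold l PySem.Dict.empty (by simp [PySem.Dict.keys_empty])).1
  rw [optmizationCancelation_alt, pvTgf]
  rw [h, PySem.Dict.keys_empty]

-- A prefix disjoint from all toggled terms passes through the toggle fold untouched.
lemma pvTgPrefix (m : List Int) : ∀ (pfx acc : List Int), (∀ t ∈ m, t ∉ pfx) →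
    m.foldl pvTg (pfx ++ acc) = pfx ++ m.foldl pvTg acc := by
  induction m with
  | nil => intro pfx acc _; rfl
  | cons t m ih =>
    intro pfx acc h
    have ht : t ∉ pfx := h t (by simp)
    simp only [List.foldl_cons]
    have hstep : pvTg (pfx ++ acc) t = pfx ++ pvTg acc t := by
      unfold pvTg
      by_cases hacc : t ∈ acc
      · rw [if_pos (by simp [hacc]), if_pos hacc, List.erase_append_right _ ht]
      · rw [if_neg (by simp [hacc, ht]), if_neg hacc, List.append_assoc]
    rw [hstep, ih pfx (pvTg acc t) (fun s hs => h s (by simp [hs]))]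

-- Cancelling the first matching pair does not change the toggle fold.
lemma pvTgCancel (v : Int) (m r : List Int) (hv : v ∉ m) :
    pvTgf (v :: (m ++ v :: r)) = pvTgf (m ++ r) := by
  unfold pvTgf
  simp only [List.foldl_cons, List.foldl_append]
  have h0 : pvTg [] v = [v] := by simp [pvTg]
  have h1 : m.foldl pvTg [v] = [v] ++ m.foldl pvTg [] := by
    have := pvTgPrefix m [v] [] (by intro t ht; simp; rintro rfl; exact hv ht)
    simpa using this
  rw [h0, h1]
  have h2 : pvTg ([v] ++ m.foldl pvTg []) v = m.foldl pvTg [] := by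
    simp [pvTg]
  rw [h2]

-- First-occurrence split of a membership.
lemma pvFirstSplit {v : Int} : ∀ {s : List Int}, v ∈ s →
    ∃ m r, s = m ++ v :: r ∧ v ∉ m := by
  intro s
  induction s with
  | nil => intro hs; cases hs
  | cons a s ih =>
    intro hs
    by_cases hav : a = v
    · exact ⟨[], s, by simp [hav], by simp⟩
    · have hvs : v ∈ s := by
        rcases List.mem_cons.mp hs with h | h
        · exact absurd h.symm hav
        · exact h
      rcases ih hvs with ⟨m, r, rfl, hvm⟩
      refine ⟨a :: m, r, by simp, ?_⟩
      intro hmem'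
      rcases List.mem_cons.mp hmem' with h | h
      · exact hav h.symm
      · exact hvm h

lemma pvEraseIdxAppend (k : Nat) : ∀ (p s : List Int),
    (p ++ s).eraseIdx (p.length + k) = p ++ s.eraseIdx k := by
  intro p
  induction p with
  | nil => intro s; simp
  | cons a p ih => intro s; simp [Nat.add_right_comm, ih]

-- pvInnerA finds nothing: it returns (l, n, n).
lemma pvInnerNone (l : List Int) (n ps : Nat) (hn : n = l.length) (hps : ps < l.length) :
    ∀ idx, idx ≤ n → (∀ j, idx ≤ j → (hj : j < l.length) → l[j] ≠ l[ps]) →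
    pvInnerA l n ps idx = (l, n, n) := by
  intro idx
  induction hk : n - idx using Nat.strong_induction_on generalizing idx with
  | _ k ih =>
  intro hle hno
  unfold pvInnerA
  by_cases hidx : idx < n
  · rw [dif_pos hidx]
    have hidx' : idx < l.length := hn ▸ hidx
    rw [List.getElem?_eq_getElem hps, List.getElem?_eq_getElem hidx']
    dsimp only
    rw [if_neg (fun h => hno idx le_rfl hidx' (Eq.symm h))]
    exact ih (n - (idx + 1)) (by omega) (idx + 1) rfl (by omega)
      (fun j hj hj' => hno j (by omega) hj')
  · rw [dif_neg hidx]
    have : idx = n := by omega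
    rw [this]

-- pvInnerA finds the first match at j: pops j then ps.
lemma pvInnerFound (l : List Int) (n ps j : Nat) (hn : n = l.length)
    (hps : ps < l.length) (hj : j < l.length) (hjv : l[j] = l[ps]) :
    ∀ idx, idx ≤ j → (∀ k, idx ≤ k → (hk : k < l.length) → k < j → l[k] ≠ l[ps]) →
    pvInnerA l n ps idx = ((l.eraseIdx j).eraseIdx ps, n - 2, ps + 1) := by
  intro idx
  induction hk : j - idx using Nat.strong_induction_on generalizing idx with
  | _ k ih =>
  intro hij hmin
  unfold pvInnerA
  have hidx : idx < n := by omega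
  rw [dif_pos hidx]
  have hidx' : idx < l.length := hn ▸ hidx
  rw [List.getElem?_eq_getElem hps, List.getElem?_eq_getElem hidx']
  dsimp only
  by_cases he : idx = j
  · subst he
    rw [if_pos (by rw [hjv])]
  · rw [if_neg (fun h => hmin idx le_rfl hidx' (by omega) (Eq.symm h))]
    exact ih (j - (idx + 1)) (by omega) (idx + 1) rfl (by omega)
      (fun k hk hk' hkj => hmin k (by omega) hk' hkj)

-- Main simulation: from state (p ++ s, |p|+|s|, |p|, |p|+1) the outer loop returns
-- p ++ toggle-fold of s, given enough fuel.
lemma pvOuterMain : ∀ (fuel : Nat) (p s : List Int),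
    p.length + s.length + s.length + 1 ≤ fuel →
    pvOuterA fuel (p ++ s) (p.length + s.length) p.length (p.length + 1) =
      p ++ pvTgf s := by
  intro fuel
  induction fuel with
  | zero => intro p s h; omega
  | succ fuel ih =>
    intro p s hfuel
    rw [pvOuterA]
    cases s with
    | nil => rw [if_neg (by simp)]; simp [pvTgf]
    | cons v s' =>
      by_cases hs' : s' = []
      · subst hs'; rw [if_neg (by simp)]; simp [pvTgf, pvTg]
      · have hlen : 1 ≤ s'.length := List.length_pos_of_ne_nil hs'
        rw [if_pos (by simp; omega)]
        have hplen : p.length < (p ++ v :: s').length := by simp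
        have hgetps : (p ++ v :: s')[p.length]'hplen = v := by
          rw [List.getElem_append_right le_rfl]
          simp
        by_cases hv : v ∈ s'
        · -- first match at j = p.length + 1 + m.length
          rcases pvFirstSplit hv with ⟨m, r, hsplit, hvm⟩
          subst hsplit
          have hj : p.length + 1 + m.length < (p ++ v :: (m ++ v :: r)).length := by
            simp; omega
          have hgetj : (p ++ v :: (m ++ v :: r))[p.length + 1 + m.length]'hj = v := by
            have h1 : (p ++ v :: (m ++ v :: r)) = (p ++ v :: m) ++ v :: r := by simp
            rw [List.getElem_of_eq h1, List.getElem_append_right (by simp; omega)]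
            simp [show p.length + 1 + m.length - (p.length + (m.length + 1)) = 0 from by omega]
          have hinner := pvInnerFound (p ++ v :: (m ++ v :: r))
            (p.length + (v :: (m ++ v :: r)).length) p.length (p.length + 1 + m.length)
            (by simp) hplen hj (by rw [hgetj, hgetps]) (p.length + 1) (by omega) ?hmin
          case hmin =>
            intro k hk1 hk2 hk3
            rw [hgetps]
            have hkm : (p ++ v :: (m ++ v :: r))[k]'hk2 = m[k - p.length - 1]'(by omega) := by
              have h1 : (p ++ v :: (m ++ v :: r)) = (p ++ [v]) ++ (m ++ v :: r) := by simp
              rw [List.getElem_of_eq h1, List.getElem_append_right (by simp; omega),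
                List.getElem_append_left (by simp; omega)]
              congr 1
              simp
              omega
            rw [hkm]
            intro hcon
            exact hvm (hcon ▸ List.getElem_mem _)
          rw [hinner]
          dsimp only
          rw [if_neg (by omega)]
          -- the popped list is p ++ (m ++ r)
          have hpop : (((p ++ v :: (m ++ v :: r)).eraseIdx
              (p.length + 1 + m.length)).eraseIdx p.length) = p ++ (m ++ r) := by
            have h1 : p.length + 1 + m.length = p.length + (1 + m.length) := by omega
            rw [h1, pvEraseIdxAppend]
            have h2 : (v :: (m ++ v :: r)).eraseIdx (1 + m.length) = v :: (m ++ r) := by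
              have h3 : 1 + m.length = m.length + 1 := by omega
              rw [h3, List.eraseIdx_cons_succ]
              have h4 := pvEraseIdxAppend 0 m (v :: r)
              simp only [Nat.add_zero] at h4
              rw [h4]
              simp
            rw [h2]
            have h5 := pvEraseIdxAppend 0 p (v :: (m ++ r))
            simp only [Nat.add_zero] at h5
            rw [h5]
            simp
          rw [hpop]
          have hn2 : p.length + (v :: (m ++ v :: r)).length - 2 =
              p.length + (m ++ r).length := by simp; omega
          rw [hn2]
          rw [ih p (m ++ r) (by simp at hfuel ⊢; omega)]
          rw [pvTgCancel v m r hvm]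
        · -- no match: prevStart advances
          have hinner := pvInnerNone (p ++ v :: s') (p.length + (v :: s').length) p.length
            (by simp) hplen (p.length + 1) (by simp) ?hno
          case hno =>
            intro jj hj1 hj2
            rw [hgetps]
            have hjs : (p ++ v :: s')[jj]'hj2 = s'[jj - p.length - 1]'(by simp at hj2; omega) := by
              have h1 : (p ++ v :: s') = (p ++ [v]) ++ s' := by simp
              rw [List.getElem_of_eq h1, List.getElem_append_right (by simp; omega)]
              congr 1
              simp
              omega
            rw [hjs]
            intro hcon
            exact hv (hcon ▸ List.getElem_mem _)
          rw [hinner]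
          dsimp only
          rw [if_pos (by simp; omega)]
          have h1 : p ++ v :: s' = (p ++ [v]) ++ s' := by simp
          have h2 : p.length + (v :: s').length = (p ++ [v]).length + s'.length := by
            simp; omega
          have h3 : p.length + 2 = (p ++ [v]).length + 1 := by simp
          rw [h1, h2, show p.length + 1 = (p ++ [v]).length by simp, h3]
          rw [ih (p ++ [v]) s' (by simp at hfuel ⊢; omega)]
          have h4 : pvTgf (v :: s') = [v] ++ pvTgf s' := by
            unfold pvTgf
            simp only [List.foldl_cons]
            have h5 : pvTg [] v = [v] ++ [] := by simp [pvTg]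
            rw [h5, pvTgPrefix s' [v] [] (by intro t ht; simp; rintro rfl; exact hv ht)]
          rw [h4]
          simp

-- ===== VERDICT (by name: the statement is the Claim_ definition above) =====
theorem optmizationCancelation_spec : Claim_equal_optmizationCancelation := by
  intro l _
  show optmizationCancelation l = optmizationCancelation_alt l
  rw [pvAltEqTgf]
  have h := pvOuterMain (2 * l.length + 1) [] l (by simp; omega)
  simpa [optmizationCancelation] using h
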